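-- pv_equiv track=rewrite | github.com/haobinzheng/mcp_codes | client_inmemory_v2_google_adk.py | _prompt_refers_to_previous_selection
-- ===== SOURCE A (Python) =====
-- def _prompt_refers_to_previous_selection(prompt: str) -> bool:
--     lower_prompt = prompt.lower()
--     return any(
--         term in lower_prompt
--         for term in (
--             "same ",
--             "above",
--             "those",
--             "that list",
--             "previous",
--             "following",
--             "same format",
--         )
--     )
-- ===== SOURCE B (Python) =====
-- _TERMS = ("same ", "above", "those", "that list", "previous", "following", "same format")
--
-- def _prompt_refers_to_previous_selection(prompt: str) -> bool:
--     # One left-to-right pass: at each position, check whether any phrase starts there.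
--     s = prompt.lower()
--     for i in range(len(s)):
--         for t in _TERMS:
--             if s.startswith(t, i):
--                 return True
--     return False
-- ===== Notes on version B (the rewrite author's own statement) =====
-- stated objective: alternative
-- what changed: Replaces seven independent whole-string substring scans (one per phrase) with a single left-to-right pass over the text that tests each position for any phrase starting there.
import Mathlib
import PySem

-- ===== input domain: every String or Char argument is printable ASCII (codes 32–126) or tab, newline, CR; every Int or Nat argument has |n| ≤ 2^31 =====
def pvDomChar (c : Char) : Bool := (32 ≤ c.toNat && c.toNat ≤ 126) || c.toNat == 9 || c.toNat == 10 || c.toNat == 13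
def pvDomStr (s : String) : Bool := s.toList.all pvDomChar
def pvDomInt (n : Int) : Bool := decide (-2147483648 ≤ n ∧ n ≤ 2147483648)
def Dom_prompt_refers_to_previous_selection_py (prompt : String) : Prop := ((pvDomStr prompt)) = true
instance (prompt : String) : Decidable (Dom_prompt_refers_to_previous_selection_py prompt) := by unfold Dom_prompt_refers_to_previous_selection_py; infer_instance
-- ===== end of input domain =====

-- B replaces seven independent substring scans with one left-to-right pass testing each
-- position for a phrase starting there (objective: alternative traversal, same cost).
-- ===== PORT A =====
def prompt_refers_to_previous_selection_py (prompt : String) : Bool :=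
  let lower_prompt := PySem.Str.lower prompt
  [("same " : String), "above", "those", "that list", "previous", "following", "same format"].any
    (fun term => PySem.Str.isIn term lower_prompt)

-- ===== PORT B =====
def pvTerms : List (List Char) :=
  ["same ".toList, "above".toList, "those".toList, "that list".toList,
   "previous".toList, "following".toList, "same format".toList]

def pvScan : List Char → Bool
  | [] => false
  | c :: rest =>
    if pvTerms.any (fun t => PySem.Chars.startswith (c :: rest) t) then true
    else pvScan rest

def prompt_refers_to_previous_selection_py_alt (prompt : String) : Bool :=
  pvScan (PySem.Chars.lower prompt.toList)

-- ===== PRECONDITION & SPEC =====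
def Spec_prompt_refers_to_previous_selection_py (prompt : String) (out : Bool) : Prop := out = prompt_refers_to_previous_selection_py_alt prompt
instance (prompt : String) (out : Bool) : Decidable (Spec_prompt_refers_to_previous_selection_py prompt out) := by unfold Spec_prompt_refers_to_previous_selection_py; infer_instance

-- ===== CLAIM (what is proved, stated in full; the proofs are below) =====
def Claim_equal_prompt_refers_to_previous_selection_py : Prop := ∀ (prompt : String), Dom_prompt_refers_to_previous_selection_py prompt → Spec_prompt_refers_to_previous_selection_py prompt (prompt_refers_to_previous_selection_py prompt)

-- ===== LEMMAS AND PROOFS =====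

-- ===== VERDICT (by name: the statement is the Claim_ definition above) =====
lemma pvScan_true_iff (s : List Char) : pvScan s = true ↔ ∃ t ∈ pvTerms, t <:+: s := by
  induction s with
  | nil => simp [pvScan]; decide
  | cons c rest ih =>
    simp only [pvScan]
    split_ifs with h
    · simp only [List.any_eq_true, PySem.Chars.startswith_iff] at h
      obtain ⟨t, ht, hp⟩ := h
      exact iff_of_true rfl ⟨t, ht, hp.isInfix⟩
    · simp only [List.any_eq_true, PySem.Chars.startswith_iff] at h
      push Not at h
      rw [ih]
      constructor
      · rintro ⟨t, ht, hinf⟩; exact ⟨t, ht, hinf.trans ((List.suffix_cons c rest).isInfix)⟩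
      · rintro ⟨t, ht, hinf⟩
        rcases (List.infix_cons_iff).1 hinf with hp | hi
        · exact absurd hp (h t ht)
        · exact ⟨t, ht, hi⟩

theorem prompt_refers_to_previous_selection_py_spec : Claim_equal_prompt_refers_to_previous_selection_py := by
  intro prompt _
  unfold Spec_prompt_refers_to_previous_selection_py
  unfold prompt_refers_to_previous_selection_py prompt_refers_to_previous_selection_py_alt
  rw [Bool.eq_iff_iff, pvScan_true_iff]
  simp only [List.any_eq_true, PySem.Chars.isIn_iff_infix, PySem.Str.isIn]
  simp [PySem.Str.toList_lower, pvTerms]
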